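-- pv_equiv track=rewrite | github.com/lifuyaq/answer_finder | search_helper/future4.py | check_reservation_sparse
-- ===== SOURCE A (Python) =====
-- class SparseBitmap:
--     def __init__(self, chunk_size=1024):
--         self.bitmap = {}  # 使用字典存储稀疏块
--         self.chunk_size = chunk_size  # 每块的大小
--
--     def set(self, index):
--         """设置某个位为1"""
--         chunk_id = index // self.chunk_size
--         offset = index % self.chunk_size
--         if chunk_id not in self.bitmap:
--             self.bitmap[chunk_id] = 0
--         self.bitmap[chunk_id] |= (1 << offset)
--
--     def is_set(self, index):
--         """检查某个位是否为1"""
--         chunk_id = index // self.chunk_size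
--         offset = index % self.chunk_size
--         if chunk_id not in self.bitmap:
--             return False
--         return (self.bitmap[chunk_id] & (1 << offset)) != 0
--
-- def check_reservation_sparse(n, occupied_indices, l, r):
--     # 初始化稀疏位图
--     bitmap = SparseBitmap()
--     for idx in occupied_indices:
--         bitmap.set(idx)
--
--     # 检查区间 [l, r]
--     for i in range(l, r + 1):
--         if not bitmap.is_set(i):  # 找到第一个未占用的位置
--             return i
--     return -1  # 如果区间已排满
-- ===== SOURCE B (Python) =====
-- def check_reservation_sparse(n, occupied_indices, l, r):
--     # sort the distinct occupied indices inside [l, r], then walk the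
--     # expected consecutive value to find the first gap
--     occs = sorted(set(x for x in occupied_indices if l <= x <= r))
--     cand = l
--     for x in occs:
--         if x == cand:
--             cand += 1
--     return cand if cand <= r else -1
-- ===== Notes on version B (the rewrite author's own statement) =====
-- stated objective: faster
-- what changed: Instead of building a sparse bitmap over all occupied indices and scanning every index of [l, r], B sorts the distinct occupied indices inside [l, r] and walks the expected consecutive value to find the first gap.
import Mathlib
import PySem

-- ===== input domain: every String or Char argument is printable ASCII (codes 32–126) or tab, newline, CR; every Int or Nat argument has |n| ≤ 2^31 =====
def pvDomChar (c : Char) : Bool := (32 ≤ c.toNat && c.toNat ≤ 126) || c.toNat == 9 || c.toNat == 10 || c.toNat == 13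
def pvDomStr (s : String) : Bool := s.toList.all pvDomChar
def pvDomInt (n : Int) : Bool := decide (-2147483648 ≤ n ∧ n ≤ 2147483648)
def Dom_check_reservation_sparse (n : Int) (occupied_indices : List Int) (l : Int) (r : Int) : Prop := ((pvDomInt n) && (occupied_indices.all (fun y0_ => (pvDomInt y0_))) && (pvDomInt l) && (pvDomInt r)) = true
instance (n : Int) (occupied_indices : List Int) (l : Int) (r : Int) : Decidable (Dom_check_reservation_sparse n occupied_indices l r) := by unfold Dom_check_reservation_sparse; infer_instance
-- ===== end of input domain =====

-- B replaces A's sparse-bitmap build plus a scan of every index in [l, r] by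
-- sorting the distinct occupied indices inside [l, r] and walking the expected
-- consecutive value to the first gap (objective: faster).

-- ===== PORT A =====
-- SparseBitmap.set (chunk_size = 1024).  The Python dict {chunk_id: int} is a
-- PySem.Dict Int Int; '1 << offset' is '(1:Int) <<< offset.toNat', exact since
-- offset = index % 1024 is always nonnegative (Python floor mod, divisor > 0).
def pySparseSet (bm : PySem.Dict Int Int) (index : Int) : PySem.Dict Int Int :=
  let chunk_id := PySem.Int.floordiv index 1024
  let offset := PySem.Int.mod index 1024
  let bm1 := if bm.contains chunk_id then bm else bm.insert chunk_id 0
  bm1.insert chunk_id (PySem.Int.bor (bm1.getD chunk_id 0) ((1:Int) <<< offset.toNat))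

-- SparseBitmap.is_set.  After the 'chunk_id not in bitmap' guard the key is
-- present, so the Python lookup self.bitmap[chunk_id] is getD _ 0.
def pySparseIsSet (bm : PySem.Dict Int Int) (index : Int) : Bool :=
  let chunk_id := PySem.Int.floordiv index 1024
  let offset := PySem.Int.mod index 1024
  if ¬ bm.contains chunk_id then false
  else PySem.Int.band (bm.getD chunk_id 0) ((1:Int) <<< offset.toNat) != 0

-- the 'for i in range(l, r+1)' loop with early return: i runs l, l+1, …;
-- the remaining iteration count (r + 1 - l).toNat stands for range's own bound
-- (range is a lazy iterator — materialising it as a list is not evaluable)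
def crsLoop (bm : PySem.Dict Int Int) (i : Int) : Nat → Int
  | 0 => -1
  | fuel + 1 => if ¬ pySparseIsSet bm i then i else crsLoop bm (i + 1) fuel

def check_reservation_sparse (n : Int) (occupied_indices : List Int) (l : Int) (r : Int) : Int :=
  let bitmap := occupied_indices.foldl pySparseSet PySem.Dict.empty
  crsLoop bitmap l (r + 1 - l).toNat

-- ===== PORT B =====
def check_reservation_sparse_alt (n : Int) (occupied_indices : List Int) (l : Int) (r : Int) : Int :=
  let occs := PySem.List.sorted
    (PySem.Set.ofList (occupied_indices.filter (fun x => decide (l ≤ x) && decide (x ≤ r))))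
    (fun x => x) false
  let cand := occs.foldl (fun cand x => if x == cand then cand + 1 else cand) l
  if cand ≤ r then cand else -1

-- ===== PRECONDITION & SPEC =====
def Spec_check_reservation_sparse (n : Int) (occupied_indices : List Int) (l : Int) (r : Int) (out : Int) : Prop := out = check_reservation_sparse_alt n occupied_indices l r
instance (n : Int) (occupied_indices : List Int) (l : Int) (r : Int) (out : Int) : Decidable (Spec_check_reservation_sparse n occupied_indices l r out) := by unfold Spec_check_reservation_sparse; infer_instance

-- ===== CLAIM (what is proved, stated in full; the proofs are below) =====
def Claim_equal_check_reservation_sparse : Prop := ∀ (n : Int) (occupied_indices : List Int) (l : Int) (r : Int), Dom_check_reservation_sparse n occupied_indices l r → Spec_check_reservation_sparse n occupied_indices l r (check_reservation_sparse n occupied_indices l r)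

-- ===== LEMMAS AND PROOFS =====

-- `1 << k` is the two-power
theorem one_shl_eq (k : Nat) : (1:Int) <<< k = ((2 ^ k : Nat) : Int) := by
  simp [Int.shiftLeft_eq]

-- bit test through an OR of a single bit, over Nat
theorem nat_bit_or (m : Nat) (j k : Nat) :
    ((m ||| (2 ^ k)) &&& 2 ^ j ≠ 0) ↔ (m &&& 2 ^ j ≠ 0 ∨ j = k) := by
  have h1 : ∀ v : Nat, (v &&& 2 ^ j ≠ 0) ↔ v.testBit j = true := by
    intro v
    rw [Nat.and_two_pow]
    cases h : v.testBit j <;> simp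
  rw [h1, h1, Nat.testBit_or, Nat.testBit_two_pow]
  cases h : m.testBit j <;> simp [eq_comm]

-- getD across one SparseBitmap.set
theorem getD_pySparseSet (d : PySem.Dict Int Int) (x c : Int) :
    (pySparseSet d x).getD c 0 =
      if c = PySem.Int.floordiv x 1024 then
        PySem.Int.bor (d.getD c 0) ((1:Int) <<< (PySem.Int.mod x 1024).toNat)
      else d.getD c 0 := by
  show (PySem.Dict.insert
      (if d.contains (PySem.Int.floordiv x 1024) then d else d.insert (PySem.Int.floordiv x 1024) 0)
      (PySem.Int.floordiv x 1024)
      (PySem.Int.bor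
        ((if d.contains (PySem.Int.floordiv x 1024) then d else d.insert (PySem.Int.floordiv x 1024) 0).getD
          (PySem.Int.floordiv x 1024) 0)
        ((1:Int) <<< (PySem.Int.mod x 1024).toNat))).getD c 0 = _
  by_cases hc : d.contains (PySem.Int.floordiv x 1024)
  · rw [if_pos hc, PySem.Dict.getD_insert]
    split_ifs with h
    · subst h; rfl
    · rfl
  · rw [if_neg hc]
    have h0 : d.getD (PySem.Int.floordiv x 1024) 0 = 0 :=
      PySem.Dict.getD_of_not_contains d 0 (by simpa using hc)
    simp only [PySem.Dict.getD_insert]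
    split_ifs with h
    · subst h; rw [h0]
    · rfl

theorem nonneg_pySparseSet (d : PySem.Dict Int Int) (x : Int)
    (h : ∀ c, 0 ≤ d.getD c 0) : ∀ c, 0 ≤ (pySparseSet d x).getD c 0 := by
  intro c
  rw [getD_pySparseSet]
  split_ifs with hc
  · rw [one_shl_eq, PySem.Int.bor_of_nonneg (h c) (by positivity)]
    positivity
  · exact h c

-- is_set reads just the stored chunk value (a missing chunk stores 0)
theorem pySparseIsSet_eq_getD (d : PySem.Dict Int Int) (i : Int) :
    pySparseIsSet d i =
      (PySem.Int.band (d.getD (PySem.Int.floordiv i 1024) 0)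
        ((1:Int) <<< (PySem.Int.mod i 1024).toNat) != 0) := by
  show (if ¬ d.contains (PySem.Int.floordiv i 1024) then false
      else PySem.Int.band (d.getD (PySem.Int.floordiv i 1024) 0)
        ((1:Int) <<< (PySem.Int.mod i 1024).toNat) != 0) = _
  by_cases h : d.contains (PySem.Int.floordiv i 1024)
  · rw [if_neg (not_not_intro h)]
  · rw [if_pos (by simpa using h),
      PySem.Dict.getD_of_not_contains d 0 (by simpa using h),
      PySem.Int.band_comm, PySem.Int.band_zero]
    decide

-- the chunk/offset pair determines the index
theorem chunk_offset_inj (x i : Int)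
    (h1 : PySem.Int.floordiv i 1024 = PySem.Int.floordiv x 1024)
    (h2 : PySem.Int.mod i 1024 = PySem.Int.mod x 1024) : i = x := by
  have hi := PySem.Int.floordiv_mul_add_mod i 1024
  have hx := PySem.Int.floordiv_mul_add_mod x 1024
  rw [h1, h2] at hi
  omega

-- one set flips exactly the bit of x
theorem pySparseIsSet_pySparseSet (d : PySem.Dict Int Int) (x i : Int)
    (h : ∀ c, 0 ≤ d.getD c 0) :
    pySparseIsSet (pySparseSet d x) i = (pySparseIsSet d i || (i == x)) := by
  rw [pySparseIsSet_eq_getD, pySparseIsSet_eq_getD, getD_pySparseSet]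
  by_cases hc : PySem.Int.floordiv i 1024 = PySem.Int.floordiv x 1024
  · rw [if_pos hc, hc]
    have hv : 0 ≤ d.getD (PySem.Int.floordiv x 1024) 0 := h _
    have hmodi : 0 ≤ PySem.Int.mod i 1024 := PySem.Int.mod_nonneg i (by norm_num)
    have hmodx : 0 ≤ PySem.Int.mod x 1024 := PySem.Int.mod_nonneg x (by norm_num)
    have hix : ((PySem.Int.mod i 1024).toNat = (PySem.Int.mod x 1024).toNat) ↔ i = x := by
      constructor
      · intro hh; exact chunk_offset_inj x i hc (by omega)
      · rintro rfl; rfl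
    have key : PySem.Int.band
          (PySem.Int.bor (d.getD (PySem.Int.floordiv x 1024) 0) ((1:Int) <<< (PySem.Int.mod x 1024).toNat))
          ((1:Int) <<< (PySem.Int.mod i 1024).toNat) ≠ 0
        ↔ (PySem.Int.band (d.getD (PySem.Int.floordiv x 1024) 0) ((1:Int) <<< (PySem.Int.mod i 1024).toNat) ≠ 0
           ∨ i = x) := by
      rw [one_shl_eq, one_shl_eq,
        PySem.Int.bor_of_nonneg hv (by positivity),
        PySem.Int.band_of_nonneg (by positivity) (by positivity),
        PySem.Int.band_of_nonneg hv (by positivity)]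
      simp only [Int.toNat_natCast, Int.natCast_eq_zero, ne_eq]
      rw [← hix]
      exact nat_bit_or ..
    by_cases h2 : i = x
    · subst h2
      have hX := key.2 (Or.inr rfl)
      rw [beq_self_eq_true, Bool.or_true]
      simp only [bne_iff_ne, ne_eq]
      exact hX
    · by_cases h1 : PySem.Int.band (d.getD (PySem.Int.floordiv x 1024) 0)
          ((1:Int) <<< (PySem.Int.mod i 1024).toNat) = 0
      · have hX : PySem.Int.band
            (PySem.Int.bor (d.getD (PySem.Int.floordiv x 1024) 0) ((1:Int) <<< (PySem.Int.mod x 1024).toNat))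
            ((1:Int) <<< (PySem.Int.mod i 1024).toNat) = 0 := by
          by_contra hh
          rcases key.1 hh with hA | h2'
          · exact hA h1
          · exact h2 h2'
        rw [hX, h1]
        simp only [bne_self_eq_false, Bool.false_or]
        exact (beq_eq_false_iff_ne.2 h2).symm
      · have hX := key.2 (Or.inl h1)
        rw [show (PySem.Int.band
              (PySem.Int.bor (d.getD (PySem.Int.floordiv x 1024) 0) ((1:Int) <<< (PySem.Int.mod x 1024).toNat))
              ((1:Int) <<< (PySem.Int.mod i 1024).toNat) != 0) = true from bne_iff_ne.2 hX,
          show (PySem.Int.band (d.getD (PySem.Int.floordiv x 1024) 0)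
              ((1:Int) <<< (PySem.Int.mod i 1024).toNat) != 0) = true from bne_iff_ne.2 h1,
          Bool.true_or]
  · rw [if_neg hc]
    have hne : (i == x) = false := by
      simp only [beq_eq_false_iff_ne, ne_eq]
      intro hh; subst hh; exact hc rfl
    rw [hne, Bool.or_false]

-- the bitmap built from occ answers membership
theorem isSet_foldl (occ : List Int) (d : PySem.Dict Int Int) (i : Int)
    (h : ∀ c, 0 ≤ d.getD c 0) :
    pySparseIsSet (occ.foldl pySparseSet d) i = (pySparseIsSet d i || occ.contains i) := by
  induction occ generalizing d with
  | nil => simp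
  | cons x rest ih =>
      simp only [List.foldl_cons, List.contains_cons]
      rw [ih _ (nonneg_pySparseSet d x h), pySparseIsSet_pySparseSet d x i h]
      cases pySparseIsSet d i <;> cases hix : (i == x) <;> simp

theorem isSet_final (occ : List Int) (i : Int) :
    pySparseIsSet (occ.foldl pySparseSet PySem.Dict.empty) i = occ.contains i := by
  rw [isSet_foldl occ PySem.Dict.empty i (by intro c; simp [PySem.Dict.getD_empty])]
  have h0 : pySparseIsSet PySem.Dict.empty i = false := by
    unfold pySparseIsSet
    simp [PySem.Dict.contains_empty]
  simp [h0]

-- B's fold leaves cand alone when no element equals it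
theorem foldl_cand_const (S : List Int) (c : Int) (h : ∀ x ∈ S, x ≠ c) :
    S.foldl (fun cand x => if x == cand then cand + 1 else cand) c = c := by
  induction S with
  | nil => rfl
  | cons x rest ih =>
      simp only [List.foldl_cons]
      rw [if_neg (by simp [h x (by simp)])]
      exact ih (fun y hy => h y (by simp [hy]))

-- the sorted distinct occupied list for [l, r]
def occSorted (occ : List Int) (l r : Int) : List Int :=
  PySem.List.sorted
    (PySem.Set.ofList (occ.filter (fun x => decide (l ≤ x) && decide (x ≤ r))))
    (fun x => x) false

theorem mem_occSorted (occ : List Int) (l r x : Int) :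
    x ∈ occSorted occ l r ↔ x ∈ occ ∧ l ≤ x ∧ x ≤ r := by
  unfold occSorted
  rw [PySem.List.mem_sorted, PySem.Set.mem_ofList, List.mem_filter]
  simp

theorem pairwise_occSorted (occ : List Int) (l r : Int) :
    (occSorted occ l r).Pairwise (· < ·) :=
  PySem.List.sorted_ofList_pairwise_lt _

-- peeling the minimum: when l itself is occupied
theorem occSorted_cons (occ : List Int) (l r : Int) (hlr : l ≤ r) (hl : l ∈ occ) :
    occSorted occ l r = l :: occSorted occ (l + 1) r := by
  have hgt : ∀ b ∈ occSorted occ (l+1) r, l < b := by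
    intro b hb
    have := (mem_occSorted occ (l+1) r b).1 hb
    omega
  have hpw : (l :: occSorted occ (l+1) r).Pairwise (· < ·) :=
    List.pairwise_cons.2 ⟨hgt, pairwise_occSorted occ (l+1) r⟩
  conv_lhs => unfold occSorted
  apply PySem.List.sorted_eq_of_perm_of_pairwise_lt
  · rw [List.perm_ext_iff_of_nodup (hpw.imp (fun hab => ne_of_lt hab)) (PySem.Set.nodup_ofList _)]
    intro a
    rw [List.mem_cons, mem_occSorted, PySem.Set.mem_ofList, List.mem_filter]
    simp only [Bool.and_eq_true, decide_eq_true_eq]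
    constructor
    · rintro (rfl | ⟨ha, h2, h3⟩)
      · exact ⟨hl, le_rfl, hlr⟩
      · exact ⟨ha, by omega, h3⟩
    · rintro ⟨ha, hb1, hb2⟩
      by_cases hal : a = l
      · exact Or.inl hal
      · exact Or.inr ⟨ha, by omega, hb2⟩
  · exact hpw

-- the common value of both programs, by induction on the interval length
theorem crs_main (occ : List Int) : ∀ (fuel : Nat) (l r : Int), (r + 1 - l).toNat = fuel →
    crsLoop (occ.foldl pySparseSet PySem.Dict.empty) l fuel
      = (if (occSorted occ l r).foldl (fun cand x => if x == cand then cand + 1 else cand) l ≤ r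
         then (occSorted occ l r).foldl (fun cand x => if x == cand then cand + 1 else cand) l
         else -1) := by
  intro fuel
  induction fuel with
  | zero =>
      intro l r h
      have hS : occSorted occ l r = [] := by
        rw [List.eq_nil_iff_forall_not_mem]
        intro x hx
        have := (mem_occSorted occ l r x).1 hx
        omega
      rw [hS]
      simp only [crsLoop, List.foldl_nil]
      rw [if_neg (by omega)]
  | succ fuel ih =>
      intro l r h
      have hlr : l ≤ r := by omega
      simp only [crsLoop]
      rw [isSet_final]
      by_cases hl : l ∈ occ
      · rw [if_neg (by simp [hl])]
        rw [occSorted_cons occ l r hlr hl]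
        simp only [List.foldl_cons, beq_self_eq_true, if_true]
        exact ih (l + 1) r (by omega)
      · rw [if_pos (by simp [hl])]
        rw [foldl_cand_const _ _ (by
          intro x hx hxl
          exact hl (hxl ▸ ((mem_occSorted occ l r x).1 hx).1))]
        rw [if_pos hlr]

-- ===== VERDICT (by name: the statement is the Claim_ definition above) =====
theorem check_reservation_sparse_spec : Claim_equal_check_reservation_sparse := by
  intro n occ l r _
  unfold Spec_check_reservation_sparse check_reservation_sparse check_reservation_sparse_alt
  exact crs_main occ ((r + 1 - l).toNat) l r rfl
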